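-- pv_equiv track=rewrite | github.com/kevinnbass/TestMaster | TestMaster_BACKUP_20250816_175859/fix_tests_for_real_modules.py | _generate_real_params
-- ===== SOURCE A (Python) =====
-- from typing import List, Dict, Set, Optional, Any
--
-- def _generate_real_params(param_names: List[str]) -> str:
--     """Generate realistic parameters for class initialization."""
--     params = []
--     for param in param_names:
--         if 'config' in param.lower():
--             params.append('{}')
--         elif 'api_key' in param.lower() or 'key' in param.lower():
--             params.append('"test_key"')
--         elif 'url' in param.lower() or 'endpoint' in param.lower():
--             params.append('"http://test.com"')
--         elif 'name' in param.lower():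
--             params.append('"test_name"')
--         elif 'path' in param.lower() or 'file' in param.lower():
--             params.append('"/tmp/test"')
--         elif 'timeout' in param.lower() or 'delay' in param.lower():
--             params.append('1.0')
--         elif 'size' in param.lower() or 'count' in param.lower():
--             params.append('10')
--         elif 'enable' in param.lower() or 'flag' in param.lower():
--             params.append('True')
--         else:
--             params.append('None')
--
--     return ', '.join(params)
-- ===== SOURCE B (Python) =====
-- _RULES = [
--     (('config',), '{}'),
--     (('api_key', 'key'), '"test_key"'),
--     (('url', 'endpoint'), '"http://test.com"'),
--     (('name',), '"test_name"'),
--     (('path', 'file'), '"/tmp/test"'),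
--     (('timeout', 'delay'), '1.0'),
--     (('size', 'count'), '10'),
--     (('enable', 'flag'), 'True'),
-- ]
--
--
-- def _generate_real_params(param_names):
--     lowered = [p.lower() for p in param_names]
--     out = ['None'] * len(lowered)
--     # sweep rules from lowest to highest priority; later (higher-priority)
--     # passes overwrite, so each slot ends with its first-matching rule's value
--     for kws, val in reversed(_RULES):
--         for i, p in enumerate(lowered):
--             if any(k in p for k in kws):
--                 out[i] = val
--     return ', '.join(out)
-- ===== Notes on version B (the rewrite author's own statement) =====
-- stated objective: alternative
-- what changed: Inverts the loop nesting: instead of scanning the if/elif rules per parameter, B initializes all slots to 'None' and makes one overwrite pass over the parameters per rule, sweeping rules in reverse priority so the last write is the first-matching rule.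
import Mathlib
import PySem

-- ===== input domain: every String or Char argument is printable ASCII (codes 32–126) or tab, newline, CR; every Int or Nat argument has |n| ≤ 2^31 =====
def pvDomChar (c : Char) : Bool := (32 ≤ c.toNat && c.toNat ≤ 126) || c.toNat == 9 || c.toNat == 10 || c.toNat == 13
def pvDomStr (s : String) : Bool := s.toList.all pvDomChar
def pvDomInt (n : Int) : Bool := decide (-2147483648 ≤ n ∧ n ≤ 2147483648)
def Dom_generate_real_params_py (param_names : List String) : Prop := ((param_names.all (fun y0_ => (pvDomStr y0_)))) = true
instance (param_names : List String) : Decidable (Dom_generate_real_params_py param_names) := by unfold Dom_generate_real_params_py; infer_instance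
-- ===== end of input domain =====

-- B inverts the loop nesting: all slots start at "None" and each rule, swept in reverse
-- priority order, overwrites the matching slots in one pass (alternative; same cost).

-- ===== PORT A =====
-- literal transliteration: accumulator list built by the per-parameter if/elif loop, then ', '.join
def generate_real_params_py (param_names : List String) : String :=
  let params : List String :=
    param_names.foldl (fun params param =>
      if PySem.Str.isIn "config" (PySem.Str.lower param) then params ++ ["{}"]
      else if PySem.Str.isIn "api_key" (PySem.Str.lower param) || PySem.Str.isIn "key" (PySem.Str.lower param) then params ++ ["\"test_key\""]
      else if PySem.Str.isIn "url" (PySem.Str.lower param) || PySem.Str.isIn "endpoint" (PySem.Str.lower param) then params ++ ["\"http://test.com\""]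
      else if PySem.Str.isIn "name" (PySem.Str.lower param) then params ++ ["\"test_name\""]
      else if PySem.Str.isIn "path" (PySem.Str.lower param) || PySem.Str.isIn "file" (PySem.Str.lower param) then params ++ ["\"/tmp/test\""]
      else if PySem.Str.isIn "timeout" (PySem.Str.lower param) || PySem.Str.isIn "delay" (PySem.Str.lower param) then params ++ ["1.0"]
      else if PySem.Str.isIn "size" (PySem.Str.lower param) || PySem.Str.isIn "count" (PySem.Str.lower param) then params ++ ["10"]
      else if PySem.Str.isIn "enable" (PySem.Str.lower param) || PySem.Str.isIn "flag" (PySem.Str.lower param) then params ++ ["True"]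
      else params ++ ["None"]) []
  PySem.Str.join ", " params

-- ===== PORT B =====
def pvRules : List (List String × String) :=
  [ (["config"], "{}")
  , (["api_key", "key"], "\"test_key\"")
  , (["url", "endpoint"], "\"http://test.com\"")
  , (["name"], "\"test_name\"")
  , (["path", "file"], "\"/tmp/test\"")
  , (["timeout", "delay"], "1.0")
  , (["size", "count"], "10")
  , (["enable", "flag"], "True") ]

-- one overwrite pass of a single rule over the slots (Source B's inner 'for i, p in enumerate')
def pvPass (kws : List String) (val : String) (lowered out : List String) : List String :=
  List.zipWith (fun p o => if kws.any (fun k => PySem.Str.isIn k p) then val else o) lowered out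

def generate_real_params_py_alt (param_names : List String) : String :=
  let lowered := param_names.map (fun p => PySem.Str.lower p)
  let out := pvRules.reverse.foldl
      (fun out kv => pvPass kv.1 kv.2 lowered out)
      (List.replicate lowered.length "None")
  PySem.Str.join ", " out

-- ===== PRECONDITION & SPEC =====
def Spec_generate_real_params_py (param_names : List String) (out : String) : Prop := out = generate_real_params_py_alt param_names
instance (param_names : List String) (out : String) : Decidable (Spec_generate_real_params_py param_names out) := by unfold Spec_generate_real_params_py; infer_instance

-- ===== CLAIM (what is proved, stated in full; the proofs are below) =====
def Claim_equal_generate_real_params_py : Prop := ∀ (param_names : List String), Dom_generate_real_params_py param_names → Spec_generate_real_params_py param_names (generate_real_params_py param_names)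

-- ===== LEMMAS AND PROOFS =====

-- per-parameter value of the rules as a first-match recursion (proof device only)
def pvFirstMatch (t : List (List String × String)) (p : String) : String :=
  t.foldr (fun kv acc => if kv.1.any (fun k => PySem.Str.isIn k p) then kv.2 else acc) "None"

-- a single pass over slots that are a map of lowered is again such a map
theorem pvPass_map (kws : List String) (val : String) (lowered : List String) (g : String → String) :
    pvPass kws val lowered (lowered.map g)
      = lowered.map (fun p => if kws.any (fun k => PySem.Str.isIn k p) then val else g p) := by
  induction lowered with
  | nil => rfl
  | cons x xs ih => simp [pvPass] at ih ⊢; exact ih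

-- B's staged overwrite fold computes, slotwise, the foldl over the swept rules
theorem pvStage_eq (t : List (List String × String)) (lowered : List String) (g : String → String) :
    t.foldl (fun out kv => pvPass kv.1 kv.2 lowered out) (lowered.map g)
      = lowered.map (fun p => t.foldl
          (fun acc kv => if kv.1.any (fun k => PySem.Str.isIn k p) then kv.2 else acc) (g p)) := by
  induction t generalizing g with
  | nil => rfl
  | cons kv rest ih =>
    rw [List.foldl_cons, pvPass_map, ih]
    rfl

-- reverse sweep starting from "None" = first-match value
theorem pvSweep_eq (p : String) :
    pvRules.reverse.foldl
        (fun acc kv => if kv.1.any (fun k => PySem.Str.isIn k p) then kv.2 else acc) "None"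
      = pvFirstMatch pvRules p := by
  rw [List.foldl_reverse]
  rfl

-- A's per-parameter if/elif step appends exactly the first-match value
theorem pvStep_eq (params : List String) (param : String) :
    (if PySem.Str.isIn "config" (PySem.Str.lower param) then params ++ ["{}"]
     else if PySem.Str.isIn "api_key" (PySem.Str.lower param) || PySem.Str.isIn "key" (PySem.Str.lower param) then params ++ ["\"test_key\""]
     else if PySem.Str.isIn "url" (PySem.Str.lower param) || PySem.Str.isIn "endpoint" (PySem.Str.lower param) then params ++ ["\"http://test.com\""]
     else if PySem.Str.isIn "name" (PySem.Str.lower param) then params ++ ["\"test_name\""]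
     else if PySem.Str.isIn "path" (PySem.Str.lower param) || PySem.Str.isIn "file" (PySem.Str.lower param) then params ++ ["\"/tmp/test\""]
     else if PySem.Str.isIn "timeout" (PySem.Str.lower param) || PySem.Str.isIn "delay" (PySem.Str.lower param) then params ++ ["1.0"]
     else if PySem.Str.isIn "size" (PySem.Str.lower param) || PySem.Str.isIn "count" (PySem.Str.lower param) then params ++ ["10"]
     else if PySem.Str.isIn "enable" (PySem.Str.lower param) || PySem.Str.isIn "flag" (PySem.Str.lower param) then params ++ ["True"]
     else params ++ ["None"])
    = params ++ [pvFirstMatch pvRules (PySem.Str.lower param)] := by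
  simp only [pvRules, pvFirstMatch, List.foldr_cons, List.foldr_nil, List.any_cons, List.any_nil,
    Bool.or_false]
  split_ifs <;> rfl

-- A's accumulator loop is acc ++ the map of the first-match value
theorem pvFold_eq (param_names : List String) (acc : List String) :
    param_names.foldl (fun params param =>
      if PySem.Str.isIn "config" (PySem.Str.lower param) then params ++ ["{}"]
      else if PySem.Str.isIn "api_key" (PySem.Str.lower param) || PySem.Str.isIn "key" (PySem.Str.lower param) then params ++ ["\"test_key\""]
      else if PySem.Str.isIn "url" (PySem.Str.lower param) || PySem.Str.isIn "endpoint" (PySem.Str.lower param) then params ++ ["\"http://test.com\""]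
      else if PySem.Str.isIn "name" (PySem.Str.lower param) then params ++ ["\"test_name\""]
      else if PySem.Str.isIn "path" (PySem.Str.lower param) || PySem.Str.isIn "file" (PySem.Str.lower param) then params ++ ["\"/tmp/test\""]
      else if PySem.Str.isIn "timeout" (PySem.Str.lower param) || PySem.Str.isIn "delay" (PySem.Str.lower param) then params ++ ["1.0"]
      else if PySem.Str.isIn "size" (PySem.Str.lower param) || PySem.Str.isIn "count" (PySem.Str.lower param) then params ++ ["10"]
      else if PySem.Str.isIn "enable" (PySem.Str.lower param) || PySem.Str.isIn "flag" (PySem.Str.lower param) then params ++ ["True"]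
      else params ++ ["None"]) acc
    = acc ++ param_names.map (fun param => pvFirstMatch pvRules (PySem.Str.lower param)) := by
  induction param_names generalizing acc with
  | nil => simp
  | cons p ps ih =>
    rw [List.foldl_cons, pvStep_eq, ih]
    simp

-- ===== VERDICT (by name: the statement is the Claim_ definition above) =====
set_option maxHeartbeats 2000000 in
theorem generate_real_params_py_spec : Claim_equal_generate_real_params_py := by
  intro param_names _
  show PySem.Str.join ", " (param_names.foldl _ []) = generate_real_params_py_alt param_names
  rw [pvFold_eq, List.nil_append]
  show _ = PySem.Str.join ", "
      (pvRules.reverse.foldl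
        (fun out kv => pvPass kv.1 kv.2 (param_names.map (fun p => PySem.Str.lower p)) out)
        (List.replicate (param_names.map (fun p => PySem.Str.lower p)).length "None"))
  have hrep : List.replicate (List.map (fun p => PySem.Str.lower p) param_names).length "None"
      = List.map (fun _ => "None") (List.map (fun p => PySem.Str.lower p) param_names) := by
    rw [List.map_const']
  rw [hrep, pvStage_eq, List.map_map]
  have hmap : List.map
      ((fun p => List.foldl (fun acc kv =>
          if (kv.1.any fun k => PySem.Str.isIn k p) = true then kv.2 else acc) "None" pvRules.reverse)
        ∘ fun p => PySem.Str.lower p) param_names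
      = List.map (fun param => pvFirstMatch pvRules (PySem.Str.lower param)) param_names := by
    refine List.map_congr_left ?_
    intro p _
    simp only [Function.comp_apply]
    exact pvSweep_eq (PySem.Str.lower p)
  rw [hmap]
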